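-- pv_equiv track=rewrite | github.com/Limm-jk/Solving_with_Python | 2020_Summer_Kakao/2.py | plfi
-- ===== SOURCE A (Python) =====
-- import copy
-- from functools import reduce
--
-- def plfi(num1,exp1):
--     ans = []
--     num = copy.deepcopy(num1)
--     exp = copy.deepcopy(exp1)
--     count = 0
--     leng = len(exp)
--     for i in range(leng):
--         if exp[i] == '+':
--             num[i+1-count] += num[i-count]
--
--             num.pop(i-count)
--             count += 1
--     exp = list(filter(lambda x: x != '+', exp))
--     count = 0
--
--     #1. 곱하기 연산
--     num3 = copy.deepcopy(num)
--     exp3 = copy.deepcopy(exp)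
--     for i in range(len(exp3)):
--         if exp3[i] == '*':
--             num3[i+1-count] *= num3[i-count]
--             num3.pop(i-count)
--             count += 1
--     ans.append(abs(reduce(lambda x,y: x-y,num3)))
--     count = 0
--
--     #2. 빼기선
--     for i in range(len(exp)):
--         if exp[i] == '-':
--             num[i-count] -= num[i+1-count]
--             num.pop(i+1-count)
--             count += 1
--
--     ans.append(abs(reduce(lambda x,y:x*y, num)))
--
--
--     return max(ans)
-- ===== SOURCE B (Python) =====
-- def _collapse(nums, ops, sym, fn):
--     out = []
--     cur = nums[0]
--     for i, op in enumerate(ops):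
--         nxt = nums[i + 1]
--         if op == sym:
--             cur = fn(cur, nxt)
--         else:
--             out.append(cur)
--             cur = nxt
--     out.append(cur)
--     return out + nums[len(ops) + 1:]
--
--
-- def plfi(num1, exp1):
--     nums = _collapse(num1, exp1, '+', lambda x, y: x + y)
--     ops = [op for op in exp1 if op != '+']
--     m = _collapse(nums, ops, '*', lambda x, y: x * y)
--     sub = m[0]
--     for v in m[1:]:
--         sub -= v
--     p = _collapse(nums, ops, '-', lambda x, y: x - y)
--     prod = p[0]
--     for v in p[1:]:
--         prod *= v
--     return max(abs(sub), abs(prod))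
-- ===== Notes on version B (the rewrite author's own statement) =====
-- stated objective: faster
-- what changed: B replaces A's three quadratic passes (repeated list.pop with shifting index arithmetic over mutating lists) by single forward passes that build each collapsed list once with a running current value.
-- outside the precondition, e.g. on plfi([1], ['x']): A returns 1, B raises IndexError
import Mathlib
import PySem

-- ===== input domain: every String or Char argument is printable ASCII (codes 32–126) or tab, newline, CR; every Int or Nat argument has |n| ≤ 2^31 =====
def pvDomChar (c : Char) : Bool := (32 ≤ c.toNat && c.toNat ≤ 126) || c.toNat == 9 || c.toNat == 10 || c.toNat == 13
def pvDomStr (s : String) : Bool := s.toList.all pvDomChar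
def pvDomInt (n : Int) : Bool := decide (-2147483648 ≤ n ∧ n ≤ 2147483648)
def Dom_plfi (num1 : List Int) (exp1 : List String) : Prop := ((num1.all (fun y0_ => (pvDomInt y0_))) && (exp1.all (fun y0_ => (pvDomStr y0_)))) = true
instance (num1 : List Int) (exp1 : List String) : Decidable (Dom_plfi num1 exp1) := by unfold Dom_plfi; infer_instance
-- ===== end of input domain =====

-- B replaces A's quadratic pop/index-shift passes by single forward passes that build the
-- collapsed lists directly (objective: faster, asymptotic).


-- ===== PORT A =====
-- Literal port of A: three index loops over range(len(exp)) that mutate (num, count) via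
-- item assignment and pop (total forms pyGetD/pySetD/getD are exact under Pre_plfi).
def plfi (num1 : List Int) (exp1 : List String) : Int :=
  -- '+' pass
  let s1 := (PySem.List.pyRange 0 (exp1.length : Int) 1).foldl
    (fun (s : List Int × Int) i =>
      if PySem.List.pyGetD exp1 i "" = "+" then
        let num := PySem.List.pySetD s.1 (i + 1 - s.2)
          (PySem.List.pyGetD s.1 (i + 1 - s.2) 0 + PySem.List.pyGetD s.1 (i - s.2) 0)
        let num := ((PySem.List.pop? num (i - s.2)).map Prod.snd).getD num
        (num, s.2 + 1)
      else s) (num1, 0)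
  let num := s1.1
  let exp := exp1.filter (fun x => decide (x ≠ "+"))
  -- 1. '*' pass on copies num3/exp3
  let s3 := (PySem.List.pyRange 0 (exp.length : Int) 1).foldl
    (fun (s : List Int × Int) i =>
      if PySem.List.pyGetD exp i "" = "*" then
        let num3 := PySem.List.pySetD s.1 (i + 1 - s.2)
          (PySem.List.pyGetD s.1 (i + 1 - s.2) 0 * PySem.List.pyGetD s.1 (i - s.2) 0)
        let num3 := ((PySem.List.pop? num3 (i - s.2)).map Prod.snd).getD num3
        (num3, s.2 + 1)
      else s) (num, 0)
  let red3 : Int := match s3.1 with | [] => 0 | x :: r => r.foldl (· - ·) x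
  let ans1 : Int := |red3|
  -- 2. '-' pass
  let s2 := (PySem.List.pyRange 0 (exp.length : Int) 1).foldl
    (fun (s : List Int × Int) i =>
      if PySem.List.pyGetD exp i "" = "-" then
        let num := PySem.List.pySetD s.1 (i - s.2)
          (PySem.List.pyGetD s.1 (i - s.2) 0 - PySem.List.pyGetD s.1 (i + 1 - s.2) 0)
        let num := ((PySem.List.pop? num (i + 1 - s.2)).map Prod.snd).getD num
        (num, s.2 + 1)
      else s) (num, 0)
  let red2 : Int := match s2.1 with | [] => 0 | x :: r => r.foldl (· * ·) x
  let ans2 : Int := |red2|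
  max ans1 ans2

-- ===== PORT B =====
-- Source B's helper _collapse: one forward pass over enumerate(ops) reading nums[i+1], building
-- the result list directly (pyGetD is the total form of nums[i+1], exact under Pre_plfi).
def collapseB (nums : List Int) (ops : List String) (sym : String) (fn : Int → Int → Int) : List Int :=
  match nums with
  | [] => []   -- Python raises IndexError on nums[0]; unreachable under Pre_plfi
  | c :: rest =>
    let st := (PySem.List.enumerate ops 0).foldl
      (fun (s : List Int × Int) p =>
        let nxt := PySem.List.pyGetD nums (p.1 + 1) 0
        if p.2 = sym then (s.1, fn s.2 nxt) else (s.1 ++ [s.2], nxt))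
      ([], c)
    st.1 ++ [st.2] ++ PySem.List.slice (c :: rest) (some ((ops.length : Int) + 1)) none

def plfi_alt (num1 : List Int) (exp1 : List String) : Int :=
  let nums := collapseB num1 exp1 "+" (· + ·)
  let ops := exp1.filter (fun op => decide (op ≠ "+"))
  let m := collapseB nums ops "*" (· * ·)
  let sub : Int := match m with | [] => 0 | x :: r => r.foldl (· - ·) x
  let p := collapseB nums ops "-" (· - ·)
  let prod : Int := match p with | [] => 0 | x :: r => r.foldl (· * ·) x
  max |sub| |prod|

-- ===== PRECONDITION & SPEC =====
-- Pre_ excludes inputs with fewer numbers than operators+1: there A raises IndexError for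
-- most operator placements (the exact returning condition would re-simulate the passes);
-- on the degenerate such inputs where A does return, B returns the same value.
def Pre_plfi (num1 : List Int) (exp1 : List String) : Prop := exp1.length < num1.length
instance (num1 : List Int) (exp1 : List String) : Decidable (Pre_plfi num1 exp1) := by unfold Pre_plfi; infer_instance
def pvWitness_plfi : List Int × List String := ([1, 2, 3], ["+", "*"])

def Spec_plfi (num1 : List Int) (exp1 : List String) (out : Int) : Prop := out = plfi_alt num1 exp1
instance (num1 : List Int) (exp1 : List String) (out : Int) : Decidable (Spec_plfi num1 exp1 out) := by unfold Spec_plfi; infer_instance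

-- ===== CLAIM (what is proved, stated in full; the proofs are below) =====
def Claim_equal_plfi : Prop := ∀ (num1 : List Int) (exp1 : List String), Dom_plfi num1 exp1 → Pre_plfi num1 exp1 → Spec_plfi num1 exp1 (plfi num1 exp1)

-- ===== LEMMAS AND PROOFS =====

-- Recursive reading of one collapse pass: fold sym-joins into the current value, emit on others.
def collapseCore (sym : String) (f : Int → Int → Int) (cur : Int) : List (String × Int) → List Int
  | [] => [cur]
  | (op, nxt) :: ps => if op = sym then collapseCore sym f (f cur nxt) ps else cur :: collapseCore sym f nxt ps

lemma collapseCore_congr (sym : String) (f g : Int → Int → Int)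
    (hfg : ∀ a b, f a b = g a b) :
    ∀ (pairs : List (String × Int)) (cur : Int),
      collapseCore sym f cur pairs = collapseCore sym g cur pairs := by
  intro pairs
  induction pairs with
  | nil => intro cur; rfl
  | cons p ps ih =>
    intro cur
    obtain ⟨op, nxt⟩ := p
    by_cases h : op = sym <;> simp [collapseCore, h, hfg, ih]

lemma collapseCore_length (sym : String) (f : Int → Int → Int) :
    ∀ (pairs : List (String × Int)) (cur : Int),
      (collapseCore sym f cur pairs).length = 1 + pairs.countP (fun p => decide (p.1 ≠ sym)) := by
  intro pairs
  induction pairs with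
  | nil => intro cur; simp [collapseCore]
  | cons p ps ih =>
    intro cur
    obtain ⟨op, nxt⟩ := p
    by_cases h : op = sym <;> simp [collapseCore, h, ih] <;> omega

lemma collapseCore_ne_nil (sym : String) (f : Int → Int → Int) :
    ∀ (pairs : List (String × Int)) (cur : Int), collapseCore sym f cur pairs ≠ [] := by
  intro pairs
  induction pairs with
  | nil => intro cur; simp [collapseCore]
  | cons p ps ih =>
    intro cur
    obtain ⟨op, nxt⟩ := p
    by_cases h : op = sym <;> simp [collapseCore, h, ih]

-- The loop invariant for A's three passes: a pop-and-shift pass over indices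
-- range(pre.length, pre.length + suf.length) acting on done ++ cur :: rest with count c
-- computes the forward collapse of the suffix.
lemma loopA_inv (exp : List String) (sym : String) (f : Int → Int → Int)
    (step : (List Int × Int) → Int → (List Int × Int))
    (hmatch : ∀ (done : List Int) (cur nxt : Int) (rest : List Int) (c : Int),
      PySem.List.pyGetD exp ((done.length : Int) + c) "" = sym →
      step (done ++ cur :: nxt :: rest, c) ((done.length : Int) + c) = (done ++ f cur nxt :: rest, c + 1))
    (hskip : ∀ (st : List Int × Int) (i : Int), PySem.List.pyGetD exp i "" ≠ sym → step st i = st) :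
    ∀ (suf pre : List String) (done : List Int) (cur : Int) (rest : List Int) (c : Int),
      suf.length ≤ rest.length →
      (done.length : Int) + c = pre.length →
      exp = pre ++ suf →
      (PySem.List.pyRange (pre.length : Int) ((pre.length : Int) + suf.length) 1).foldl step (done ++ cur :: rest, c)
        = (done ++ collapseCore sym f cur (suf.zip rest) ++ rest.drop suf.length,
           c + (suf.countP (fun o => decide (o = sym)) : Int)) := by
  intro suf
  induction suf with
  | nil =>
    intro pre done cur rest c hlen hc hexp
    simp [PySem.List.pyRange_one_eq_nil, collapseCore]
  | cons op suf ih =>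
    intro pre done cur rest c hlen hc hexp
    match rest with
    | [] => simp at hlen
    | nxt :: rest =>
      have hlen' : suf.length ≤ rest.length := by simpa using hlen
      have hrange : PySem.List.pyRange (pre.length : Int) ((pre.length : Int) + ((op :: suf).length : Int)) 1
          = (pre.length : Int) :: PySem.List.pyRange ((pre.length : Int) + 1) ((pre.length : Int) + ((op :: suf).length : Int)) 1 := by
        exact PySem.List.pyRange_one_cons (by simp)
      rw [hrange]
      have hget : PySem.List.pyGetD exp ((pre.length : Int)) "" = op := by
        subst hexp
        rw [PySem.List.pyGetD, PySem.List.pyGet?_append_length]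
        rfl
      by_cases hop : op = sym
      · -- matching operator: merge nxt into cur, count increases
        subst hop
        have hstep := hmatch done cur nxt rest c (by rw [hc]; exact hget)
        rw [hc] at hstep
        simp only [List.foldl_cons, hstep]
        have hc' : ((done.length : Int)) + (c + 1) = ((pre.length : Int) + 1) := by omega
        have := ih (pre ++ [op]) done (f cur nxt) rest (c + 1)
          hlen' (by simpa using hc') (by simpa using hexp)
        simp only [List.length_append, List.length_cons, List.length_nil] at this
        have harith : ((pre.length : Int) + 1) = (((pre.length + 1 : Nat)) : Int) := by push_cast; ring
        rw [show ((pre.length : Int) + ((op :: suf).length : Int)) = (((pre.length + 1 : Nat)) : Int) + (suf.length : Int) by push_cast; simp; ring] at *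
        rw [harith, this]
        simp [collapseCore]
        ring
      · -- non-matching operator: nothing happens; re-split the state
        have hstep := hskip (done ++ cur :: nxt :: rest, c) (pre.length : Int) (by rw [hget]; simpa using hop)
        simp only [List.foldl_cons, hstep]
        have := ih (pre ++ [op]) (done ++ [cur]) nxt rest c
          hlen' (by simp; omega) (by simpa using hexp)
        simp only [List.length_append, List.length_cons, List.length_nil] at this
        rw [show ((pre.length : Int) + ((op :: suf).length : Int)) = (((pre.length + 1 : Nat)) : Int) + (suf.length : Int) by push_cast; simp; ring] at *
        rw [show ((pre.length : Int) + 1) = (((pre.length + 1 : Nat)) : Int) by push_cast; ring]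
        rw [show (done ++ cur :: nxt :: rest) = ((done ++ [cur]) ++ nxt :: rest) by simp]
        rw [this]
        simp [collapseCore, hop]

lemma getD_at (pre : List Int) (x : Int) (t : List Int) (d : Int) :
    PySem.List.pyGetD (pre ++ x :: t) (pre.length : Int) d = x := by
  simp [PySem.List.pyGetD]

lemma setD_at (pre : List Int) (x : Int) (t : List Int) (v : Int) :
    PySem.List.pySetD (pre ++ x :: t) (pre.length : Int) v = pre ++ v :: t := by
  rw [PySem.List.pySetD_natCast, List.set_append]
  simp

lemma pop_at (pre : List Int) (x : Int) (t : List Int) :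
    PySem.List.pop? (pre ++ x :: t) (pre.length : Int) = some (x, pre ++ t) := by
  rw [PySem.List.pop?_natCast _ _ (by simp)]
  simp [List.eraseIdx_append_of_length_le]

-- A's '+'/'*' pass ("num[i+1-count] ⊙= num[i-count]; num.pop(i-count)") on a full list.
lemma passPlus (exp : List String) (sym : String) (g : Int → Int → Int) :
    ∀ (h0 : Int) (t : List Int), exp.length ≤ t.length →
    (PySem.List.pyRange 0 (exp.length : Int) 1).foldl
      (fun (s : List Int × Int) i =>
        if PySem.List.pyGetD exp i "" = sym then
          let num := PySem.List.pySetD s.1 (i + 1 - s.2)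
            (g (PySem.List.pyGetD s.1 (i + 1 - s.2) 0) (PySem.List.pyGetD s.1 (i - s.2) 0))
          let num := ((PySem.List.pop? num (i - s.2)).map Prod.snd).getD num
          (num, s.2 + 1)
        else s) (h0 :: t, 0)
    = (collapseCore sym (fun cur nxt => g nxt cur) h0 (exp.zip t) ++ t.drop exp.length,
       (exp.countP (fun o => decide (o = sym)) : Int)) := by
  intro h0 t ht
  have hm : ∀ (done : List Int) (cur nxt : Int) (rest : List Int) (c : Int),
      PySem.List.pyGetD exp ((done.length : Int) + c) "" = sym →
      (fun (s : List Int × Int) i =>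
        if PySem.List.pyGetD exp i "" = sym then
          let num := PySem.List.pySetD s.1 (i + 1 - s.2)
            (g (PySem.List.pyGetD s.1 (i + 1 - s.2) 0) (PySem.List.pyGetD s.1 (i - s.2) 0))
          let num := ((PySem.List.pop? num (i - s.2)).map Prod.snd).getD num
          (num, s.2 + 1)
        else s) (done ++ cur :: nxt :: rest, c) ((done.length : Int) + c)
        = (done ++ g nxt cur :: rest, c + 1) := by
    intro done cur nxt rest c hget
    simp only [hget, if_true]
    have e0 : (done.length : Int) + c - c = (done.length : Int) := by ring
    have e1 : (done.length : Int) + c + 1 - c = (done.length : Int) + 1 := by ring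
    rw [e0, e1, getD_at done cur (nxt :: rest)]
    rw [show done ++ cur :: nxt :: rest = (done ++ [cur]) ++ nxt :: rest by simp,
        show (done.length : Int) + 1 = (((done ++ [cur]).length : Nat) : Int) by simp,
        getD_at (done ++ [cur]) nxt rest, setD_at (done ++ [cur]) nxt rest]
    rw [show (done ++ [cur]) ++ g nxt cur :: rest = done ++ cur :: g nxt cur :: rest by simp,
        pop_at done cur (g nxt cur :: rest)]
    rfl
  have hs : ∀ (st : List Int × Int) (i : Int), PySem.List.pyGetD exp i "" ≠ sym →
      (fun (s : List Int × Int) i =>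
        if PySem.List.pyGetD exp i "" = sym then
          let num := PySem.List.pySetD s.1 (i + 1 - s.2)
            (g (PySem.List.pyGetD s.1 (i + 1 - s.2) 0) (PySem.List.pyGetD s.1 (i - s.2) 0))
          let num := ((PySem.List.pop? num (i - s.2)).map Prod.snd).getD num
          (num, s.2 + 1)
        else s) st i = st := by
    intro st i hne
    simp [hne]
  have key := loopA_inv exp sym (fun cur nxt => g nxt cur) _ hm hs exp [] [] h0 t 0
    ht (by simp) (by simp)
  simpa using key

-- A's '-' pass ("num[i-count] -= num[i+1-count]; num.pop(i+1-count)") on a full list.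
lemma passMinus (exp : List String) (sym : String) :
    ∀ (h0 : Int) (t : List Int), exp.length ≤ t.length →
    (PySem.List.pyRange 0 (exp.length : Int) 1).foldl
      (fun (s : List Int × Int) i =>
        if PySem.List.pyGetD exp i "" = sym then
          let num := PySem.List.pySetD s.1 (i - s.2)
            (PySem.List.pyGetD s.1 (i - s.2) 0 - PySem.List.pyGetD s.1 (i + 1 - s.2) 0)
          let num := ((PySem.List.pop? num (i + 1 - s.2)).map Prod.snd).getD num
          (num, s.2 + 1)
        else s) (h0 :: t, 0)
    = (collapseCore sym (fun cur nxt => cur - nxt) h0 (exp.zip t) ++ t.drop exp.length,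
       (exp.countP (fun o => decide (o = sym)) : Int)) := by
  intro h0 t ht
  have hm : ∀ (done : List Int) (cur nxt : Int) (rest : List Int) (c : Int),
      PySem.List.pyGetD exp ((done.length : Int) + c) "" = sym →
      (fun (s : List Int × Int) i =>
        if PySem.List.pyGetD exp i "" = sym then
          let num := PySem.List.pySetD s.1 (i - s.2)
            (PySem.List.pyGetD s.1 (i - s.2) 0 - PySem.List.pyGetD s.1 (i + 1 - s.2) 0)
          let num := ((PySem.List.pop? num (i + 1 - s.2)).map Prod.snd).getD num
          (num, s.2 + 1)
        else s) (done ++ cur :: nxt :: rest, c) ((done.length : Int) + c)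
        = (done ++ (cur - nxt) :: rest, c + 1) := by
    intro done cur nxt rest c hget
    simp only [hget, if_true]
    have e0 : (done.length : Int) + c - c = (done.length : Int) := by ring
    have e1 : (done.length : Int) + c + 1 - c = (done.length : Int) + 1 := by ring
    rw [e0, e1, getD_at done cur (nxt :: rest)]
    rw [show done ++ cur :: nxt :: rest = (done ++ [cur]) ++ nxt :: rest by simp,
        show (done.length : Int) + 1 = (((done ++ [cur]).length : Nat) : Int) by simp,
        getD_at (done ++ [cur]) nxt rest]
    rw [show (done ++ [cur]) ++ nxt :: rest = done ++ cur :: nxt :: rest by simp,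
        setD_at done cur (nxt :: rest)]
    rw [show done ++ (cur - nxt) :: nxt :: rest = (done ++ [cur - nxt]) ++ nxt :: rest by simp,
        show ((done ++ [cur]).length : Int) = (((done ++ [cur - nxt]).length : Nat) : Int) by simp,
        pop_at (done ++ [cur - nxt]) nxt rest]
    simp
  have hs : ∀ (st : List Int × Int) (i : Int), PySem.List.pyGetD exp i "" ≠ sym →
      (fun (s : List Int × Int) i =>
        if PySem.List.pyGetD exp i "" = sym then
          let num := PySem.List.pySetD s.1 (i - s.2)
            (PySem.List.pyGetD s.1 (i - s.2) 0 - PySem.List.pyGetD s.1 (i + 1 - s.2) 0)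
          let num := ((PySem.List.pop? num (i + 1 - s.2)).map Prod.snd).getD num
          (num, s.2 + 1)
        else s) st i = st := by
    intro st i hne
    simp [hne]
  have key := loopA_inv exp sym (fun cur nxt => cur - nxt) _ hm hs exp [] [] h0 t 0
    ht (by simp) (by simp)
  simpa using key

-- Source B's enumerate-indexed pass equals the zip-driven collapse of the same data.
lemma enum_core (sym : String) (f : Int → Int → Int) (nums : List Int) :
    ∀ (ops : List String) (j : Nat) (acc : List Int) (cur : Int),
      j + ops.length < nums.length →
      (let st := (PySem.List.enumerate ops (j : Int)).foldl
          (fun (s : List Int × Int) p =>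
            let nxt := PySem.List.pyGetD nums (p.1 + 1) 0
            if p.2 = sym then (s.1, f s.2 nxt) else (s.1 ++ [s.2], nxt)) (acc, cur);
       st.1 ++ [st.2]) = acc ++ collapseCore sym f cur (ops.zip (nums.drop (j + 1))) := by
  intro ops
  induction ops with
  | nil => intro j acc cur _; simp [PySem.List.enumerate_nil, collapseCore]
  | cons op ops ih =>
    intro j acc cur hj
    have hj1 : j + 1 < nums.length := by simp at hj; omega
    have hdrop : nums.drop (j + 1) = nums[j + 1] :: nums.drop (j + 2) :=
      List.drop_eq_getElem_cons hj1
    have hget : PySem.List.pyGetD nums ((j : Int) + 1) 0 = nums[j + 1] := by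
      rw [show ((j : Int) + 1) = ((j + 1 : Nat) : Int) by push_cast; ring,
          PySem.List.pyGetD_natCast]
      simp [List.getD_eq_getElem?_getD, List.getElem?_eq_getElem hj1]
    rw [PySem.List.enumerate_cons]
    simp only [List.foldl_cons, hget]
    rw [show ((j : Int) + 1) = ((j + 1 : Nat) : Int) by push_cast; ring]
    by_cases hop : op = sym
    · rw [if_pos hop, ih (j + 1) acc (f cur nums[j + 1]) (by simp at hj ⊢; omega),
          hdrop, List.zip_cons_cons]
      simp only [collapseCore, hop, if_true]
    · rw [if_neg hop, ih (j + 1) (acc ++ [cur]) nums[j + 1] (by simp at hj ⊢; omega),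
          hdrop, List.zip_cons_cons]
      simp only [collapseCore, hop, if_false]
      norm_num

-- Source B's _collapse on a nonempty list is collapseCore plus the untouched tail.
lemma collapseB_core (sym : String) (f : Int → Int → Int) (c : Int) (rest : List Int)
    (ops : List String) (hlen : ops.length ≤ rest.length) :
    collapseB (c :: rest) ops sym f
      = collapseCore sym f c (ops.zip rest) ++ rest.drop ops.length := by
  have h1 := enum_core sym f (c :: rest) ops 0 [] c (by simp; omega)
  have h2 : PySem.List.slice (c :: rest) (some ((ops.length : Int) + 1)) none
      = rest.drop ops.length := by
    rw [show ((ops.length : Int) + 1) = ((ops.length + 1 : Nat) : Int) by push_cast; ring,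
        PySem.List.slice_from_natCast]
    simp
  simp only [Nat.cast_zero] at h1
  simp only [collapseB, h1, h2, List.nil_append]
  simp

lemma countP_zip_fst (l1 : List String) (l2 : List Int) (hl : l1.length ≤ l2.length)
    (p : String → Bool) :
    (l1.zip l2).countP (fun q => p q.1) = l1.countP p := by
  induction l1 generalizing l2 with
  | nil => simp
  | cons a l1 ih =>
    match l2 with
    | [] => simp at hl
    | b :: l2 =>
      have : l1.length ≤ l2.length := by simp at hl; omega
      simp [List.countP_cons, ih l2 this]

theorem plfi_eq_alt (num1 : List Int) (exp1 : List String) (hpre : Pre_plfi num1 exp1) :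
    plfi num1 exp1 = plfi_alt num1 exp1 := by
  match num1 with
  | [] => exact absurd hpre (by simp [Pre_plfi])
  | h0 :: t =>
    have ht : exp1.length ≤ t.length := by
      have := hpre; unfold Pre_plfi at this; simp at this; omega
    -- the collapsed '+' list, in A's orientation and in B's orientation, coincide
    have hcong_add : collapseCore "+" (fun cur nxt => nxt + cur) h0 (exp1.zip t)
        = collapseCore "+" (fun cur nxt => cur + nxt) h0 (exp1.zip t) :=
      collapseCore_congr _ _ _ (fun a b => by ring) _ _
    -- name the collapsed list and expose its head
    have hlen1 : (collapseCore "+" (fun cur nxt => cur + nxt) h0 (exp1.zip t)).length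
        = 1 + (exp1.filter (fun x => decide (x ≠ "+"))).length := by
      rw [collapseCore_length, ← List.countP_eq_length_filter]
      congr 1
      exact countP_zip_fst exp1 t ht (fun x => decide (x ≠ "+"))
    obtain ⟨h2, cc', hnum⟩ :=
      List.exists_cons_of_ne_nil
        (collapseCore_ne_nil "+" (fun cur nxt => cur + nxt) (exp1.zip t) h0)
    have hnumfull : collapseCore "+" (fun cur nxt => cur + nxt) h0 (exp1.zip t)
        ++ t.drop exp1.length = h2 :: (cc' ++ t.drop exp1.length) := by
      rw [hnum]; simp
    have ht2 : (exp1.filter (fun x => decide (x ≠ "+"))).length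
        ≤ (cc' ++ t.drop exp1.length).length := by
      rw [hnum] at hlen1
      simp only [List.length_cons] at hlen1
      simp only [List.length_append]
      omega
    have hcong_mul : collapseCore "*" (fun cur nxt => nxt * cur) h2
          ((exp1.filter (fun x => decide (x ≠ "+"))).zip (cc' ++ t.drop exp1.length))
        = collapseCore "*" (fun cur nxt => cur * nxt) h2
          ((exp1.filter (fun x => decide (x ≠ "+"))).zip (cc' ++ t.drop exp1.length)) :=
      collapseCore_congr _ _ _ (fun a b => by ring) _ _
    simp only [plfi, plfi_alt,
      passPlus exp1 "+" (fun a b => a + b) h0 t ht,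
      collapseB_core "+" (fun x y => x + y) h0 t exp1 ht,
      collapseB_core "*" (fun x y => x * y) h2 (cc' ++ t.drop exp1.length)
        (exp1.filter (fun x => decide (x ≠ "+"))) ht2,
      collapseB_core "-" (fun x y => x - y) h2 (cc' ++ t.drop exp1.length)
        (exp1.filter (fun x => decide (x ≠ "+"))) ht2,
      hcong_add, hnumfull,
      passPlus (exp1.filter (fun x => decide (x ≠ "+"))) "*" (fun a b => a * b) h2
        (cc' ++ t.drop exp1.length) ht2,
      passMinus (exp1.filter (fun x => decide (x ≠ "+"))) "-" h2
        (cc' ++ t.drop exp1.length) ht2,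
      hcong_mul]

-- ===== VERDICT (by name: the statement is the Claim_ definition above) =====
theorem plfi_spec : Claim_equal_plfi := by
  intro num1 exp1 _ hpre
  unfold Spec_plfi
  exact plfi_eq_alt num1 exp1 hpre
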